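-- pv_equiv track=rewrite | github.com/gistraw0454/AI_Programming | forTest/Vowels.py | occurringVowels
-- ===== SOURCE A (Python) =====
-- def occurringVowels(word):
--     word = word.upper()
--     vowels = ('A','E','I','O','U')
--     included = []
--     for vowel in vowels:
--         if (vowel in word) and (vowel not in included):
--             included.append(vowel)
--     return included
-- ===== SOURCE B (Python) =====
-- def occurringVowels(word):
--     # One pass over the characters: collect vowel characters into a set,
--     # then emit them in the fixed AEIOU order.
--     seen = set()
--     for ch in word.upper():
--         if ch in ('A', 'E', 'I', 'O', 'U'):
--             seen.add(ch)
--     return [v for v in ('A', 'E', 'I', 'O', 'U') if v in seen]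
-- ===== Notes on version B (the rewrite author's own statement) =====
-- stated objective: alternative
-- what changed: B makes a single pass over the characters of the uppercased word, collecting vowel characters into a set, then filters the fixed AEIOU tuple against that set, instead of A scanning the whole word once per vowel with a substring test plus a membership check on the growing result list.
import Mathlib
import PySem

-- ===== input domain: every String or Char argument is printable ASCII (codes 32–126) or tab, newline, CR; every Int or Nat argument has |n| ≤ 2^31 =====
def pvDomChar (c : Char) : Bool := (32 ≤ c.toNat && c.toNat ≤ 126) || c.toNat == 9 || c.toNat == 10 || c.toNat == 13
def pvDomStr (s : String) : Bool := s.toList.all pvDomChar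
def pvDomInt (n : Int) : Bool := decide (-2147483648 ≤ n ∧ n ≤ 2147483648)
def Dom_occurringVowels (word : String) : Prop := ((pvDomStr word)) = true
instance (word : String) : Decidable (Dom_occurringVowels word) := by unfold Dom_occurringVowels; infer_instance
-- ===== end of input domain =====

-- B replaces A's five substring scans of the word (one per vowel) by one pass over the
-- word's characters building a set of seen vowels, then filters the fixed AEIOU tuple.

-- ===== PORT A =====
def occurringVowels (word : String) : List String :=
  let w := PySem.Str.upper word
  ["A", "E", "I", "O", "U"].foldl
    (fun included vowel =>
      if PySem.Str.isIn vowel w && !(included.contains vowel) then included ++ [vowel]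
      else included)
    []

-- ===== PORT B =====
-- Python B's set holds 1-character vowel strings; they are represented as Char here
-- (exact: every string compared is a single character), paired with the String emitted.
def occurringVowels_alt (word : String) : List String :=
  let seen : PySem.Set Char :=
    (PySem.Chars.upper word.toList).foldl
      (fun s ch => if ch ∈ ['A', 'E', 'I', 'O', 'U'] then PySem.Set.add s ch else s)
      PySem.Set.empty
  (([("A", 'A'), ("E", 'E'), ("I", 'I'), ("O", 'O'), ("U", 'U')].filter
      (fun p => PySem.Set.contains seen p.2)).map Prod.fst)

-- ===== PRECONDITION & SPEC =====
def Spec_occurringVowels (word : String) (out : List String) : Prop := out = occurringVowels_alt word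
instance (word : String) (out : List String) : Decidable (Spec_occurringVowels word out) := by unfold Spec_occurringVowels; infer_instance

-- ===== CLAIM (what is proved, stated in full; the proofs are below) =====
def Claim_equal_occurringVowels : Prop := ∀ (word : String), Dom_occurringVowels word → Spec_occurringVowels word (occurringVowels word)

-- ===== LEMMAS AND PROOFS =====

-- A's test "vowel in word" on a 1-character vowel is just character membership.
theorem isIn_singleton (c : Char) (s : List Char) : PySem.Chars.isIn [c] s = s.contains c := by
  rw [Bool.eq_iff_iff]
  simp [PySem.Chars.isIn_iff_infix, List.singleton_infix_iff]

-- B's seen-set contains exactly the vowel characters occurring in the traversed list.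
theorem seen_contains (l : List Char) (c : Char) (s : PySem.Set Char) :
    PySem.Set.contains
      (l.foldl (fun s ch => if ch ∈ ['A', 'E', 'I', 'O', 'U'] then PySem.Set.add s ch else s) s) c
      = (s.contains c || (decide (c ∈ ['A', 'E', 'I', 'O', 'U']) && l.contains c)) := by
  induction l generalizing s with
  | nil => simp [PySem.Set.contains]
  | cons x xs ih =>
    rw [Bool.eq_iff_iff]
    by_cases hx : x ∈ ['A', 'E', 'I', 'O', 'U'] <;> by_cases hcx : c = x <;>
      simp_all [List.foldl_cons, PySem.Set.contains, PySem.Set.mem_add]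

-- ===== VERDICT (by name: the statement is the Claim_ definition above) =====
set_option maxHeartbeats 2000000 in
theorem occurringVowels_spec : Claim_equal_occurringVowels := by
  intro word _
  show occurringVowels word = occurringVowels_alt word
  unfold occurringVowels occurringVowels_alt
  cases hA : (PySem.Chars.upper word.toList).contains 'A' <;>
  cases hE : (PySem.Chars.upper word.toList).contains 'E' <;>
  cases hI : (PySem.Chars.upper word.toList).contains 'I' <;>
  cases hO : (PySem.Chars.upper word.toList).contains 'O' <;>
  cases hU : (PySem.Chars.upper word.toList).contains 'U' <;>
    (simp only [PySem.Str.isIn_eq, PySem.Str.toList_upper, String.reduceToList,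
      isIn_singleton, seen_contains, List.foldl, List.filter, hA, hE, hI, hO, hU];
     decide)
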